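-- pv_equiv track=rewrite | github.com/gorkemkanmis/Sliding-Puzzle | Sliding Puzzle/sistem_motoru.py | _analiz_et
-- ===== SOURCE A (Python) =====
-- def _analiz_et(dizi):
--     # Dizinin çözülebilir olup olmadığını ters düzen (inversion) sayısıyla kontrol eder
--     ters_duzen_sayisi = 0
--     # Boş kareyi (0) hesaplamaya dahil etme
--     sadece_sayilar = [n for n in dizi if n != 0]
--     for sira_a in range(len(sadece_sayilar)):
--         for sira_b in range(sira_a + 1, len(sadece_sayilar)):
--             # Önceki eleman sonrakinden büyükse ters düzen var demektir
--             if sadece_sayilar[sira_a] > sadece_sayilar[sira_b]: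
--                 ters_duzen_sayisi += 1
--     # Çift sayıda ters düzen varsa dizilim çözülebilirdir
--     return ters_duzen_sayisi % 2 == 0
-- ===== SOURCE B (Python) =====
-- def _analiz_et(dizi):
--     # Merge-sort inversion counting: O(n log n) instead of the O(n^2) pair scan.
--     def sort_count(a):
--         n = len(a)
--         if n < 2:
--             return a, 0
--         left, cl = sort_count(a[:n // 2])
--         right, cr = sort_count(a[n // 2:])
--         merged = []
--         inv = cl + cr
--         i = j = 0
--         while i < len(left) and j < len(right):
--             if left[i] <= right[j]:
--                 merged.append(left[i]); i += 1
--             else: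
--                 inv += len(left) - i
--                 merged.append(right[j]); j += 1
--         merged.extend(left[i:])
--         merged.extend(right[j:])
--         return merged, inv
--     _, inv = sort_count([n for n in dizi if n != 0])
--     return inv % 2 == 0
-- ===== Notes on version B (the rewrite author's own statement) =====
-- stated objective: faster
-- what changed: Replaced the nested index-pair scan that counts inversions with a recursive merge-sort that counts inversions during the merge, then takes the parity.
import Mathlib
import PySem

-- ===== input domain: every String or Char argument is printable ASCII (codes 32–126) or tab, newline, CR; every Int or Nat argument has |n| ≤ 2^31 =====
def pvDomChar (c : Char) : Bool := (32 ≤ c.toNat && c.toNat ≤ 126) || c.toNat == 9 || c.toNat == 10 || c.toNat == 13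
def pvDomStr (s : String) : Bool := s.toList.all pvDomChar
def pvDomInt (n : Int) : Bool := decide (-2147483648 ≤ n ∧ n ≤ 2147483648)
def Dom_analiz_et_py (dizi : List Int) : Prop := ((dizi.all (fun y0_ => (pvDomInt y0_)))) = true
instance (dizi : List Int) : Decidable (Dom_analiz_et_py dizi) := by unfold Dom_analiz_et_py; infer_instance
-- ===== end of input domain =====

-- B replaces A's O(n^2) nested pair scan by merge-sort inversion counting, then takes the same parity.

-- ===== PORT A =====
def analiz_et_py (dizi : List Int) : Bool :=
  let sadece := dizi.filter (fun n => n != 0)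
  let ters :=
    (PySem.List.pyRange 0 (sadece.length : Int) 1).foldl (fun acc a =>
      (PySem.List.pyRange (a + 1) (sadece.length : Int) 1).foldl (fun acc2 b =>
        if PySem.List.pyGetD sadece a 0 > PySem.List.pyGetD sadece b 0 then acc2 + 1 else acc2)
        acc) (0 : Int)
  decide (PySem.Int.mod ters 2 = 0)

-- ===== PORT B =====
-- merge loop of Source B: when an element comes from the right run, add the number of left elements remaining
def pvMergeCount : List Int → List Int → List Int × Int
  | [], r => (r, 0)
  | l, [] => (l, 0)
  | x :: l, y :: r =>
    if x ≤ y then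
      let p := pvMergeCount l (y :: r)
      (x :: p.1, p.2)
    else
      let p := pvMergeCount (x :: l) r
      (y :: p.1, p.2 + ((l.length : Int) + 1))
termination_by l r => l.length + r.length

-- sort_count of Source B
def pvSortCount (a : List Int) : List Int × Int :=
  if _h : a.length < 2 then (a, 0)
  else
    let left := pvSortCount (a.take (a.length / 2))
    let right := pvSortCount (a.drop (a.length / 2))
    let m := pvMergeCount left.1 right.1
    (m.1, left.2 + right.2 + m.2)
termination_by a.length
decreasing_by
  · simp; omega
  · simp; omega

def analiz_et_py_alt (dizi : List Int) : Bool :=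
  decide (PySem.Int.mod (pvSortCount (dizi.filter (fun n => n != 0))).2 2 = 0)

-- ===== PRECONDITION & SPEC =====
def Spec_analiz_et_py (dizi : List Int) (out : Bool) : Prop := out = analiz_et_py_alt dizi
instance (dizi : List Int) (out : Bool) : Decidable (Spec_analiz_et_py dizi out) := by unfold Spec_analiz_et_py; infer_instance

-- ===== CLAIM (what is proved, stated in full; the proofs are below) =====
def Claim_equal_analiz_et_py : Prop := ∀ (dizi : List Int), Dom_analiz_et_py dizi → Spec_analiz_et_py dizi (analiz_et_py dizi)

-- ===== LEMMAS AND PROOFS =====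

-- number of inversions: for each element, later elements smaller than it
def pvInv : List Int → Nat
  | [] => 0
  | x :: t => t.countP (fun y => decide (x > y)) + pvInv t

-- cross inversions between two blocks
def pvCross (l r : List Int) : Nat := (l.map (fun x => r.countP (fun y => decide (x > y)))).sum

theorem pvInv_append (l r : List Int) : pvInv (l ++ r) = pvInv l + pvInv r + pvCross l r := by
  induction l with
  | nil => simp [pvInv, pvCross]
  | cons x l ih => simp [pvInv, pvCross, List.countP_append, ih]; ring

theorem pvCross_perm_left {l l' : List Int} (h : l.Perm l') (r : List Int) :
    pvCross l r = pvCross l' r := (h.map _).sum_eq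

theorem pvCross_perm_right (l : List Int) {r r' : List Int} (h : r.Perm r') :
    pvCross l r = pvCross l r' := by
  unfold pvCross
  congr 1
  exact List.map_congr_left (fun x _ => h.countP_eq _)

theorem pvCross_cons_right (l : List Int) (y : Int) (r : List Int) :
    pvCross l (y :: r) = l.countP (fun z => decide (z > y)) + pvCross l r := by
  induction l with
  | nil => simp [pvCross]
  | cons a t ih =>
    simp only [pvCross, List.map_cons, List.sum_cons, List.countP_cons] at ih ⊢
    split_ifs <;> omega

theorem pvMergeCount_perm : ∀ (l r : List Int), (pvMergeCount l r).1.Perm (l ++ r)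
  | [], r => by simp [pvMergeCount]
  | x :: l, [] => by simp [pvMergeCount]
  | x :: l, y :: r => by
    by_cases hxy : x ≤ y
    · simpa [pvMergeCount, hxy] using (pvMergeCount_perm l (y :: r)).cons x
    · have ih := (pvMergeCount_perm (x :: l) r).cons y
      simp only [pvMergeCount, if_neg hxy]
      exact ih.trans List.perm_middle.symm
termination_by l r => l.length + r.length

theorem pvMergeCount_sorted : ∀ (l r : List Int), l.Pairwise (· ≤ ·) → r.Pairwise (· ≤ ·) →
    (pvMergeCount l r).1.Pairwise (· ≤ ·)
  | [], r, _, hr => by simpa [pvMergeCount] using hr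
  | x :: l, [], hl, _ => by simpa [pvMergeCount] using hl
  | x :: l, y :: r, hl, hr => by
    by_cases hxy : x ≤ y
    · have ih := pvMergeCount_sorted l (y :: r) (hl.sublist (List.sublist_cons_self x l)) hr
      simp only [pvMergeCount, if_pos hxy]
      refine List.pairwise_cons.mpr ⟨?_, ih⟩
      intro z hz
      have hz' : z ∈ l ++ y :: r := (pvMergeCount_perm l (y :: r)).mem_iff.mp hz
      rcases List.mem_append.mp hz' with hz | hz
      · exact List.rel_of_pairwise_cons hl hz
      · rcases List.mem_cons.mp hz with rfl | hz
        · exact hxy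
        · exact le_trans hxy (List.rel_of_pairwise_cons hr hz)
    · have ih := pvMergeCount_sorted (x :: l) r hl (hr.sublist (List.sublist_cons_self y r))
      simp only [pvMergeCount, if_neg hxy]
      refine List.pairwise_cons.mpr ⟨?_, ih⟩
      intro z hz
      have hz' : z ∈ (x :: l) ++ r := (pvMergeCount_perm (x :: l) r).mem_iff.mp hz
      rcases List.mem_append.mp hz' with hz | hz
      · rcases List.mem_cons.mp hz with rfl | hz
        · omega
        · have := List.rel_of_pairwise_cons hl hz; omega
      · exact List.rel_of_pairwise_cons hr hz
termination_by l r => l.length + r.length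

theorem pvMergeCount_count : ∀ (l r : List Int), l.Pairwise (· ≤ ·) → r.Pairwise (· ≤ ·) →
    (pvMergeCount l r).2 = (pvCross l r : Int)
  | [], r, _, _ => by simp [pvMergeCount, pvCross]
  | x :: l, [], _, _ => by simp [pvMergeCount, pvCross]
  | x :: l, y :: r, hl, hr => by
    by_cases hxy : x ≤ y
    · have ih := pvMergeCount_count l (y :: r) (hl.sublist (List.sublist_cons_self x l)) hr
      have hcx : (y :: r).countP (fun z => decide (x > z)) = 0 := by
        rw [List.countP_eq_zero]
        intro z hz
        rcases List.mem_cons.mp hz with rfl | hz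
        · simp; omega
        · have := List.rel_of_pairwise_cons hr hz; simp; omega
      simp only [pvMergeCount, if_pos hxy]
      simp [pvCross, hcx, ih, pvCross]
    · have ih := pvMergeCount_count (x :: l) r hl (hr.sublist (List.sublist_cons_self y r))
      have hcnt : (x :: l).countP (fun z => decide (z > y)) = l.length + 1 := by
        rw [List.countP_eq_length.mpr ?_]
        · simp
        · intro z hz
          rcases List.mem_cons.mp hz with rfl | hz
          · simp; omega
          · have := List.rel_of_pairwise_cons hl hz; simp; omega
      simp only [pvMergeCount, if_neg hxy]
      rw [ih, pvCross_cons_right, hcnt]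
      push_cast
      ring
termination_by l r => l.length + r.length

theorem pvSortCount_spec (a : List Int) :
    (pvSortCount a).1.Perm a ∧ (pvSortCount a).1.Pairwise (· ≤ ·) ∧
      (pvSortCount a).2 = (pvInv a : Int) := by
  induction hn : a.length using Nat.strong_induction_on generalizing a with
  | _ n ih =>
  subst hn
  by_cases h : a.length < 2
  · have hsmall : a = [] ∨ ∃ x, a = [x] := by
      match a, h with
      | [], _ => exact Or.inl rfl
      | [x], _ => exact Or.inr ⟨x, rfl⟩
    rcases hsmall with rfl | ⟨x, rfl⟩
    · simp [pvSortCount, pvInv]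
    · simp [pvSortCount, pvInv]
  · have htake : (a.take (a.length / 2)).length < a.length := by simp; omega
    have hdrop : (a.drop (a.length / 2)).length < a.length := by simp; omega
    have ihl := ih _ htake _ rfl
    have ihr := ih _ hdrop _ rfl
    have hperm := pvMergeCount_perm (pvSortCount (a.take (a.length / 2))).1
      (pvSortCount (a.drop (a.length / 2))).1
    have hsorted := pvMergeCount_sorted _ _ ihl.2.1 ihr.2.1
    have hcount := pvMergeCount_count _ _ ihl.2.1 ihr.2.1
    have htd : a.take (a.length / 2) ++ a.drop (a.length / 2) = a := List.take_append_drop _ _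
    rw [pvSortCount, dif_neg h]
    refine ⟨?_, hsorted, ?_⟩
    · exact hperm.trans ((ihl.1.append ihr.1).trans (by rw [htd]))
    · have hinv : pvInv a = pvInv (a.take (a.length / 2)) + pvInv (a.drop (a.length / 2)) +
          pvCross (a.take (a.length / 2)) (a.drop (a.length / 2)) := by
        conv_lhs => rw [← htd]
        exact pvInv_append _ _
      simp only []
      rw [hcount, ihl.2.2, ihr.2.2,
        pvCross_perm_left ihl.1 _, pvCross_perm_right _ ihr.1, hinv]
      push_cast
      ring

-- A's double loop over index pairs computes pvInv (stated on getD after index normalisation)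
theorem pvSum_eq_inv (s : List Int) :
    ((List.range s.length).map
      (fun k => (((s.drop (k + 1)).countP (fun y => decide (s.getD k 0 > y)) : Nat) : Int))).sum
      = (pvInv s : Int) := by
  induction s with
  | nil => simp [pvInv]
  | cons x t ih =>
    rw [List.length_cons, List.range_succ_eq_map]
    simp only [List.map_cons, List.sum_cons, List.map_map]
    have hmap : ((List.range t.length).map
        ((fun k => (((( x :: t).drop (k + 1)).countP (fun y => decide ((x :: t).getD k 0 > y)) : Nat) : Int)) ∘ Nat.succ))
        = (List.range t.length).map
          (fun k => (((t.drop (k + 1)).countP (fun y => decide (t.getD k 0 > y)) : Nat) : Int)) := by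
      refine List.map_congr_left ?_
      intro k _
      simp only [Function.comp_apply, Nat.succ_eq_add_one, List.drop_succ_cons,
        List.getD_cons_succ]
    rw [hmap, ih]
    simp [pvInv]

theorem pvA_char (s : List Int) :
    (PySem.List.pyRange 0 (s.length : Int) 1).foldl (fun acc a =>
      (PySem.List.pyRange (a + 1) (s.length : Int) 1).foldl (fun acc2 b =>
        if PySem.List.pyGetD s a 0 > PySem.List.pyGetD s b 0 then acc2 + 1 else acc2)
        acc) (0 : Int) = (pvInv s : Int) := by
  have hinner : ∀ (acc : Int), ∀ a ∈ PySem.List.pyRange 0 (s.length : Int) 1,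
      (PySem.List.pyRange (a + 1) (s.length : Int) 1).foldl (fun acc2 b =>
        if PySem.List.pyGetD s a 0 > PySem.List.pyGetD s b 0 then acc2 + 1 else acc2) acc
      = acc + (((s.drop (a + 1).toNat).countP
          (fun y => decide (PySem.List.pyGetD s a 0 > y)) : Nat) : Int) := by
    intro acc a ha
    have h0 : (0 : Int) ≤ a + 1 := by
      have := (PySem.List.mem_pyRange_one.mp ha).1; omega
    have h1 := PySem.List.foldl_pyRange_pyGetD' s 0
      (fun acc2 y => if PySem.List.pyGetD s a 0 > y then acc2 + 1 else acc2) acc h0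
    exact h1.trans (PySem.List.foldl_ite_add_one _ _ acc)
  rw [PySem.List.foldl_congr_mem (PySem.List.pyRange 0 (s.length : Int) 1) _
      (fun acc a => acc + (((s.drop (a + 1).toNat).countP
        (fun y => decide (PySem.List.pyGetD s a 0 > y)) : Nat) : Int)) 0 hinner,
    PySem.List.foldl_add, PySem.List.pyRange_zero_nat, List.map_map]
  have hmap : ((List.range s.length).map
      ((fun a => (((s.drop (a + 1).toNat).countP (fun y => decide (PySem.List.pyGetD s a 0 > y)) : Nat) : Int)) ∘ (fun k : Nat => (k : Int))))
      = (List.range s.length).map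
        (fun k => (((s.drop (k + 1)).countP (fun y => decide (s.getD k 0 > y)) : Nat) : Int)) := by
    refine List.map_congr_left ?_
    intro k _
    have h1 : ((k : Int) + 1).toNat = k + 1 := by omega
    simp [h1, PySem.List.pyGetD_natCast]
  rw [hmap, pvSum_eq_inv]
  simp

-- ===== VERDICT (by name: the statement is the Claim_ definition above) =====
theorem analiz_et_py_spec : Claim_equal_analiz_et_py := by
  intro dizi _
  show analiz_et_py dizi = analiz_et_py_alt dizi
  simp only [analiz_et_py, analiz_et_py_alt]
  rw [pvA_char, (pvSortCount_spec (dizi.filter (fun n => n != 0))).2.2]
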